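-- pv_equiv track=rewrite | github.com/alexpop89/playing-around | palindrome/preston-longest-palindrome.py | has_alphabetical_letters
-- ===== SOURCE A (Python) =====
-- def has_alphabetical_letters(str_value, how_many = 3):
--     count = 1
--     for index in range(len(str_value) - 1):
--         if str_value[index] < str_value[index + 1]:
--             count += 1
--             if count == how_many:
--                 return True
--         else:
--             count = 1
--
--     return False
-- ===== SOURCE B (Python) =====
-- def has_alphabetical_letters(str_value, how_many = 3):
--     # A run of how_many strictly increasing characters needs how_many - 1
--     # consecutive "increasing" adjacent pairs; that needs how_many >= 2.
--     if how_many < 2: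
--         return False
--     bits = ''.join('1' if str_value[i] < str_value[i + 1] else '0'
--                    for i in range(len(str_value) - 1))
--     if how_many - 1 > len(bits):
--         return False
--     return '1' * (how_many - 1) in bits
-- ===== Notes on version B (the rewrite author's own statement) =====
-- stated objective: alternative
-- what changed: Replaced the stateful run-counting loop with early return by building the adjacent-pair comparison bitstring once and testing whether a block of how_many-1 consecutive '1's occurs in it as a substring.
import Mathlib
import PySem

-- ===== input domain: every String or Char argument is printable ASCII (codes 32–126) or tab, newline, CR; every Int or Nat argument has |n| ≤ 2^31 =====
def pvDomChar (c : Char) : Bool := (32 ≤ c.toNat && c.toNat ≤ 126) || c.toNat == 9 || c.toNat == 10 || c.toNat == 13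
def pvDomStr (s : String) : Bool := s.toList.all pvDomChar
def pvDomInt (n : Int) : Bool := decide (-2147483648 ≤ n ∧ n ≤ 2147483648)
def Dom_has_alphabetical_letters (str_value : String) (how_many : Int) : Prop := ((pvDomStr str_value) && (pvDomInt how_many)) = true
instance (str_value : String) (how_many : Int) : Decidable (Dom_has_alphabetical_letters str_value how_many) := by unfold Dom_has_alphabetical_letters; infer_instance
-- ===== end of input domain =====

-- B replaces A's stateful run-counting loop by a comparison bitstring plus a substring
-- test (objective: alternative, same asymptotic cost); return values proved equal everywhere.

-- ===== PORT A =====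
-- A's loop over range(len-1) comparing str_value[index] < str_value[index+1],
-- transcribed as the structural recursion over adjacent character pairs with the
-- same `count` state, same branch order and the same early return.
def pvAGo (how_many : Int) : List Char → Int → Bool
  | c1 :: c2 :: rest, count =>
      if c1 < c2 then
        if count + 1 == how_many then true
        else pvAGo how_many (c2 :: rest) (count + 1)
      else pvAGo how_many (c2 :: rest) 1
  | _, _ => false

def has_alphabetical_letters (str_value : String) (how_many : Int) : Bool :=
  pvAGo how_many str_value.toList 1

-- ===== PORT B =====
-- Source B's bits = ''.join('1' if s[i] < s[i+1] else '0' ...): the comparison bitstring.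
def pvBits : List Char → List Char
  | c1 :: c2 :: rest => (if c1 < c2 then '1' else '0') :: pvBits (c2 :: rest)
  | _ => []

-- '…' in bits  ported as the library substring (infix) test.
def has_alphabetical_letters_alt (str_value : String) (how_many : Int) : Bool :=
  if how_many < 2 then false
  else if how_many - 1 > (pvBits str_value.toList).length then false
  else decide (List.replicate (how_many - 1).toNat '1' <:+: pvBits str_value.toList)

-- ===== PRECONDITION & SPEC =====
def Spec_has_alphabetical_letters (str_value : String) (how_many : Int) (out : Bool) : Prop := out = has_alphabetical_letters_alt str_value how_many
instance (str_value : String) (how_many : Int) (out : Bool) : Decidable (Spec_has_alphabetical_letters str_value how_many out) := by unfold Spec_has_alphabetical_letters; infer_instance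

-- ===== CLAIM (what is proved, stated in full; the proofs are below) =====
def Claim_equal_has_alphabetical_letters : Prop := ∀ (str_value : String) (how_many : Int), Dom_has_alphabetical_letters str_value how_many → Spec_has_alphabetical_letters str_value how_many (has_alphabetical_letters str_value how_many)

-- ===== LEMMAS AND PROOFS =====

-- A never succeeds when how_many < 2: count stays ≥ 1, so count+1 ≥ 2 ≠ how_many.
theorem pvAGo_false (k : Int) (hk : k < 2) :
    ∀ cs count, 1 ≤ count → pvAGo k cs count = false
  | [], _, _ => rfl
  | [_], _, _ => rfl
  | c1 :: c2 :: rest, count, hc => by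
      by_cases h : c1 < c2 <;>
        simp [pvAGo, h, pvAGo_false k hk (c2 :: rest) (count + 1) (by omega),
              pvAGo_false k hk (c2 :: rest) 1 le_rfl] <;> omega

-- A's loop runs exactly over the comparison bitstring (proof-side reformulation).
def pvRunGo (k : Int) : List Char → Int → Bool
  | b :: rest, count =>
      if b = '1' then
        if count + 1 = k then true else pvRunGo k rest (count + 1)
      else pvRunGo k rest 1
  | [], _ => false

theorem pvAGo_eq_runGo (k : Int) :
    ∀ cs count, pvAGo k cs count = pvRunGo k (pvBits cs) count
  | [], _ => rfl
  | [_], _ => rfl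
  | c1 :: c2 :: rest, count => by
      by_cases h : c1 < c2 <;>
        simp [pvAGo, pvBits, pvRunGo, h, beq_iff_eq, pvAGo_eq_runGo k (c2 :: rest)]

theorem pvReplicate_prefix_mono {m' m : Nat} {x : Char} {l : List Char}
    (hle : m' ≤ m) (h : List.replicate m x <+: l) : List.replicate m' x <+: l := by
  refine List.IsPrefix.trans ?_ h
  exact ⟨List.replicate (m - m') x, by rw [← List.replicate_add]; congr 1; omega⟩

theorem pvRunGo_iff (k : Int) :
    ∀ (bs : List Char) (count : Int), 1 ≤ count → count < k →
      (pvRunGo k bs count = true ↔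
        List.replicate (k - count).toNat '1' <+: bs ∨
        List.replicate (k - 1).toNat '1' <:+: bs)
  | [], count, h1, h2 => by
      simp only [pvRunGo, List.prefix_nil, List.infix_nil, List.replicate_eq_nil_iff]
      constructor
      · intro h; simp at h
      · rintro (h | h)
        · exact absurd h (by omega)
        · exact absurd h (by omega)
  | b :: rest, count, h1, h2 => by
      simp only [pvRunGo]
      by_cases hb : b = '1'
      · subst hb
        rw [if_pos rfl]
        by_cases hk : count + 1 = k
        · rw [if_pos hk]
          have hn : (k - count).toNat = 1 := by omega
          constructor
          · intro _
            exact Or.inl (by simp [hn, List.replicate_succ, List.cons_prefix_cons])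
          · intro _; rfl
        · have hlt : count + 1 < k := by omega
          have hIH := pvRunGo_iff k rest (count + 1) (by omega) hlt
          have hn : (k - count).toNat = (k - (count + 1)).toNat + 1 := by omega
          have hn2 : (k - 1).toNat = (k - 2).toNat + 1 := by omega
          have e1 : List.replicate (k - count).toNat '1' <+: '1' :: rest ↔
              List.replicate (k - (count + 1)).toNat '1' <+: rest := by
            rw [hn, List.replicate_succ, List.cons_prefix_cons]; simp
          have e2 : List.replicate (k - 1).toNat '1' <+: '1' :: rest ↔
              List.replicate (k - 2).toNat '1' <+: rest := by
            rw [hn2, List.replicate_succ, List.cons_prefix_cons]; simp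
          rw [if_neg hk, hIH, e1, List.infix_cons_iff, e2]
          constructor
          · rintro (h | h)
            · exact Or.inl h
            · exact Or.inr (Or.inr h)
          · rintro (h | h | h)
            · exact Or.inl h
            · exact Or.inl (pvReplicate_prefix_mono (by omega) h)
            · exact Or.inr h
      · have hIH := pvRunGo_iff k rest 1 le_rfl (by omega)
        have hn : (k - count).toNat = (k - count - 1).toNat + 1 := by omega
        have hn2 : (k - 1).toNat = (k - 2).toNat + 1 := by omega
        have e0 : ¬ (List.replicate (k - count).toNat '1' <+: b :: rest) := by
          rw [hn, List.replicate_succ, List.cons_prefix_cons]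
          rintro ⟨h, -⟩; exact hb h.symm
        have e0' : ¬ (List.replicate (k - 1).toNat '1' <+: b :: rest) := by
          rw [hn2, List.replicate_succ, List.cons_prefix_cons]
          rintro ⟨h, -⟩; exact hb h.symm
        rw [if_neg hb, hIH, List.infix_cons_iff]
        constructor
        · rintro (h | h)
          · exact Or.inr (Or.inr h.isInfix)
          · exact Or.inr (Or.inr h)
        · rintro (h | h | h)
          · exact absurd h e0
          · exact absurd h e0'
          · exact Or.inr h

-- ===== VERDICT (by name: the statement is the Claim_ definition above) =====
theorem has_alphabetical_letters_spec : Claim_equal_has_alphabetical_letters := by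
  intro s k _
  unfold Spec_has_alphabetical_letters has_alphabetical_letters has_alphabetical_letters_alt
  by_cases hk : k < 2
  · simp [hk, pvAGo_false k hk s.toList 1 le_rfl]
  · rw [if_neg hk, pvAGo_eq_runGo]
    have h := pvRunGo_iff k (pvBits s.toList) 1 le_rfl (by omega)
    by_cases hL : k - 1 > ((pvBits s.toList).length : Int)
    · rw [if_pos hL]
      rcases Bool.eq_false_or_eq_true (pvRunGo k (pvBits s.toList) 1) with hv | hv
      · exfalso
        have hlen : (k - 1).toNat ≤ (pvBits s.toList).length := by
          rcases h.mp hv with hpre | hinf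
          · simpa using hpre.length_le
          · simpa using hinf.length_le
        omega
      · exact hv
    rw [if_neg hL]
    by_cases hP : List.replicate (k - 1).toNat '1' <:+: pvBits s.toList
    · rw [decide_eq_true hP]
      exact h.mpr (Or.inr hP)
    · rw [decide_eq_false hP]
      rcases Bool.eq_false_or_eq_true (pvRunGo k (pvBits s.toList) 1) with hv | hv
      · rcases h.mp hv with hpre | hinf
        · exact absurd hpre.isInfix hP
        · exact absurd hinf hP
      · exact hv
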